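-- pv_equiv track=rewrite | github.com/ZiruiSongBest/CataIEG | data/tod/build_graph/llm_dedup_catalyst_families.py | _resolve_transitive
-- ===== SOURCE A (Python) =====
-- def _resolve_transitive(mapping: dict) -> dict:
--     """如果 A -> B -> C，把所有都折叠到最终的根（union-find 式）。"""
--     def find(x, depth=0):
--         if depth > 50:
--             return x
--         nxt = mapping.get(x, x)
--         if nxt == x:
--             return x
--         return find(nxt, depth + 1)
--     return {k: find(k) for k in mapping}
-- ===== SOURCE B (Python) =====
-- def _resolve_transitive(mapping: dict) -> dict:
--     """Per key, materialise the chase chain as a list (at most 52 nodes), then take its end."""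
--     def _chain_end(k):
--         traj = [k]
--         while len(traj) <= 51:
--             nxt = mapping.get(traj[-1], traj[-1])
--             if nxt == traj[-1]:
--                 break
--             traj.append(nxt)
--         return traj[-1]
--     return dict((k, _chain_end(k)) for k in mapping)
-- ===== Notes on version B (the rewrite author's own statement) =====
-- stated objective: alternative
-- what changed: Instead of a depth-counting recursive find, B materialises each chase chain as an explicit trajectory list (bounded by length 52) and returns its last element, assembling the result with dict() over generated pairs rather than a comprehension of recursive calls.
import Mathlib
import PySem

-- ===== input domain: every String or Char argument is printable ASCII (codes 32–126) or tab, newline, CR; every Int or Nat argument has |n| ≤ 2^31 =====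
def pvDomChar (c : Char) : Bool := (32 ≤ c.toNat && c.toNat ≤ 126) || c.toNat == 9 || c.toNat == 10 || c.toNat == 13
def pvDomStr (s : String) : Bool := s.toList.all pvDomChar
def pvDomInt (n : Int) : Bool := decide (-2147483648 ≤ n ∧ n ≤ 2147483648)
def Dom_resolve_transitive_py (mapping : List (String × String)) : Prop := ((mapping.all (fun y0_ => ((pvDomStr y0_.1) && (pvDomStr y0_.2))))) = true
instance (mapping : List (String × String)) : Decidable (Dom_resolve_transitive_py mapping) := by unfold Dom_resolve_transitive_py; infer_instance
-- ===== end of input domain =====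

-- B materialises each chase chain as an explicit bounded trajectory list and takes its last element, instead of A's depth-counting recursion; same cost, different decomposition.

-- ===== PORT A =====
-- find(x, depth): if depth > 50 return x; nxt = mapping.get(x, x); if nxt == x return x; find(nxt, depth+1)
def pvFindA (m : PySem.Dict String String) (x : String) (depth : Nat) : String :=
  if depth > 50 then x
  else
    let nxt := m.getD x x
    if nxt == x then x
    else pvFindA m nxt (depth + 1)
termination_by 51 - depth
decreasing_by omega

def resolve_transitive_py (mapping : List (String × String)) : List (String × String) :=
  let m := PySem.Dict.ofList mapping
  -- {k: find(k) for k in mapping}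
  ((PySem.Dict.keys m).foldl (fun (acc : PySem.Dict String String) k =>
      acc.insert k (pvFindA m k 0)) PySem.Dict.empty).items

-- ===== PORT B =====
-- while len(traj) <= 51: nxt = mapping.get(traj[-1], traj[-1]); if nxt == traj[-1]: break; traj.append(nxt)
def pvTrajLoop (m : PySem.Dict String String) (traj : List String) : List String :=
  if traj.length ≤ 51 then
    match traj.getLast? with
    | none => traj   -- unreachable: traj starts at [k] and only grows
    | some last =>
      let nxt := m.getD last last
      if nxt == last then traj
      else pvTrajLoop m (traj ++ [nxt])
  else traj
termination_by 52 - traj.length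
decreasing_by simp; omega

-- _chain_end(k): traj = [k]; <loop>; return traj[-1]
def pvChainEnd (m : PySem.Dict String String) (k : String) : String :=
  (pvTrajLoop m [k]).getLastD k

def resolve_transitive_py_alt (mapping : List (String × String)) : List (String × String) :=
  let m := PySem.Dict.ofList mapping
  -- dict((k, _chain_end(k)) for k in mapping)
  (PySem.Dict.ofList ((PySem.Dict.keys m).map (fun k => (k, pvChainEnd m k)))).items

-- ===== PRECONDITION & SPEC =====
def Spec_resolve_transitive_py (mapping : List (String × String)) (out : List (String × String)) : Prop := out = resolve_transitive_py_alt mapping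
instance (mapping : List (String × String)) (out : List (String × String)) : Decidable (Spec_resolve_transitive_py mapping out) := by unfold Spec_resolve_transitive_py; infer_instance

-- ===== CLAIM =====
def Claim_equal_resolve_transitive_py : Prop := ∀ (mapping : List (String × String)), Dom_resolve_transitive_py mapping → Spec_resolve_transitive_py mapping (resolve_transitive_py mapping)

-- ===== LEMMAS AND PROOFS =====

-- The last element of B's trajectory loop is A's find applied at depth (length - 1).
theorem trajLoop_last (m : PySem.Dict String String) (d : String) :
    ∀ (n : Nat) (traj : List String), traj ≠ [] → 52 - traj.length ≤ n →
      (pvTrajLoop m traj).getLastD d = pvFindA m (traj.getLastD d) (traj.length - 1) := by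
  intro n
  induction n with
  | zero =>
    intro traj hne hlen
    have h52 : 52 ≤ traj.length := by omega
    rw [pvTrajLoop, pvFindA]
    have h1 : ¬ traj.length ≤ 51 := by omega
    have h2 : traj.length - 1 > 50 := by omega
    simp [h1, h2]
  | succ k ih =>
    intro traj hne hlen
    rw [pvTrajLoop, pvFindA]
    by_cases hlt : traj.length ≤ 51
    · have hdep : ¬ (traj.length - 1 > 50) := by
        have := List.length_pos_of_ne_nil hne; omega
      obtain ⟨last, hl⟩ := List.getLast?_isSome.mpr hne |> Option.isSome_iff_exists.mp
      have hlast : traj.getLastD d = last := by simp [List.getLastD_eq_getLast?, hl]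
      simp only [hlt, if_true, hl, hdep, if_false, hlast]
      by_cases heq : m.getD last last == last
      · simp [heq, List.getLastD_eq_getLast?, hl]
      · simp only [heq, Bool.false_eq_true, if_false]
        have hpos := List.length_pos_of_ne_nil hne
        have hrec := ih (traj ++ [m.getD last last]) (by simp) (by simp; omega)
        rw [hrec]
        simp only [List.getLastD_concat, List.length_append, List.length_cons,
          List.length_nil]
        congr 1
        omega
    · have hdep : traj.length - 1 > 50 := by omega
      simp [hlt, hdep]

theorem chainEnd_eq_find (m : PySem.Dict String String) (k : String) :
    pvChainEnd m k = pvFindA m k 0 := by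
  have := trajLoop_last m k 52 [k] (by simp) (by simp)
  simpa [pvChainEnd, List.getLastD] using this

theorem resolve_transitive_py_spec : Claim_equal_resolve_transitive_py := by
  intro mapping _
  unfold Spec_resolve_transitive_py resolve_transitive_py resolve_transitive_py_alt
  set m := PySem.Dict.ofList mapping with hm
  have hnd : (PySem.Dict.keys m).Nodup := PySem.Dict.nodup_keys_ofList mapping
  -- A side: a fold of inserts over the fresh distinct keys appends the pairs in order
  have hA := PySem.Dict.items_foldl_insert_fresh (l := PySem.Dict.keys m)
      (k := fun x => x) (v := fun x => pvFindA m x 0) (d := PySem.Dict.empty)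
      (by intro a _; simp [PySem.Dict.contains_empty]) (by simpa using hnd)
  -- B side: Dict.ofList is the same fold over the (key, value) pairs
  have hB := PySem.Dict.items_foldl_insert_fresh
      (l := (PySem.Dict.keys m).map (fun x => (x, pvChainEnd m x)))
      (k := Prod.fst) (v := Prod.snd) (d := PySem.Dict.empty)
      (by intro a _; simp [PySem.Dict.contains_empty])
      (by simpa [List.map_map, Function.comp_def] using hnd)
  show _ = (PySem.Dict.ofList _).items
  rw [show (PySem.Dict.ofList ((PySem.Dict.keys m).map (fun x => (x, pvChainEnd m x))))
        = ((PySem.Dict.keys m).map (fun x => (x, pvChainEnd m x))).foldl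
            (fun d p => d.insert p.1 p.2) PySem.Dict.empty from rfl]
  rw [hA, hB]
  simp [List.map_map, Function.comp_def, chainEnd_eq_find]

-- ===== VERDICT =====
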